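-- pv_equiv track=rewrite | github.com/jbdanquah2/competitive-programming | B_Ilya_and_Queries.py | count_consecutive_chars
-- ===== SOURCE A (Python) =====
-- def count_consecutive_chars(s):
--     n = len(s)
--     prefix_sum = [0] * n
--     count = 0
--
--     for i in range(1, n):
--         if s[i] == s[i - 1]:
--             count += 1
--         prefix_sum[i] = count
--
--     return prefix_sum
-- ===== SOURCE B (Python) =====
-- def _runs(chars):
--     # maximal run lengths of equal adjacent characters
--     if not chars:
--         return []
--     res = []
--     prev, k = chars[0], 1
--     for ch in chars[1:]:
--         if ch == prev:
--             k += 1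
--         else:
--             res.append(k)
--             prev, k = ch, 1
--     res.append(k)
--     return res
--
--
-- def count_consecutive_chars(s):
--     # run-length view: a maximal run of L equal chars emits the arithmetic block
--     # total, total+1, ..., total+L-1 and raises the running pair total by L-1
--     out = []
--     total = 0
--     for run_len in _runs(s):
--         out.extend(range(total, total + run_len))
--         total += run_len - 1
--     return out
-- ===== Notes on version B (the rewrite author's own statement) =====
-- stated objective: alternative
-- what changed: A threads a running counter through one fused per-character loop writing into a preallocated array; B first run-length-encodes the string into maximal-run lengths, then emits one arithmetic block range(total, total+L) per run and bumps the total by L-1 per run.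
import Mathlib
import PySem

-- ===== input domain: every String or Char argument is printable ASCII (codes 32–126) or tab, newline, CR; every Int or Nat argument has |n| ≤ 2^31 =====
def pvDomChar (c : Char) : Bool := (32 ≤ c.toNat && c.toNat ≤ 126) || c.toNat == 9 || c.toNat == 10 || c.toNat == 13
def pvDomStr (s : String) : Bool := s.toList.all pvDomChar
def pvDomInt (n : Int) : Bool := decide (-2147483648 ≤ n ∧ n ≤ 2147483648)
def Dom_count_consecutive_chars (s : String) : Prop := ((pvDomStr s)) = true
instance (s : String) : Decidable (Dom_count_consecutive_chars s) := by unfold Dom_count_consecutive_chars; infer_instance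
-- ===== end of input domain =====

-- B replaces A's fused per-character counter loop by run-length encoding plus one arithmetic block per run; same cost, no behaviour change.

-- ===== PORT A =====
def count_consecutive_chars (s : String) : List Int :=
  let cs := s.toList
  let n : Int := (cs.length : Int)
  let prefix_sum : List Int := List.replicate n.toNat 0
  let r := (PySem.List.pyRange 1 n 1).foldl
    (fun (st : List Int × Int) i =>
      let count := if PySem.List.pyGet? cs i == PySem.List.pyGet? cs (i - 1) then st.2 + 1 else st.2
      (PySem.List.pySetD st.1 i count, count))
    (prefix_sum, 0)
  r.1

-- ===== PORT B =====
-- Source B's _runs: maximal run lengths, threading (prev, k) through the tail of the string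
def pvRunsAux : Char → Nat → List Char → List Nat
  | _, k, [] => [k]
  | prev, k, ch :: rest =>
      if ch == prev then pvRunsAux prev (k + 1) rest else k :: pvRunsAux ch 1 rest

def pvRuns : List Char → List Nat
  | [] => []
  | c :: rest => pvRunsAux c 1 rest

-- Source B's main loop: each run of length L emits range(total, total+L) and adds L-1 to total
def count_consecutive_chars_alt (s : String) : List Int :=
  ((pvRuns s.toList).foldl
    (fun (st : List Int × Int) (L : Nat) =>
      (st.1 ++ PySem.List.pyRange st.2 (st.2 + (L : Int)) 1, st.2 + (L : Int) - 1))
    ([], 0)).1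

-- ===== PRECONDITION & SPEC =====
def Spec_count_consecutive_chars (s : String) (out : List Int) : Prop := out = count_consecutive_chars_alt s
instance (s : String) (out : List Int) : Decidable (Spec_count_consecutive_chars s out) := by unfold Spec_count_consecutive_chars; infer_instance

-- ===== CLAIM (what is proved, stated in full; the proofs are below) =====
def Claim_equal_count_consecutive_chars : Prop := ∀ (s : String), Dom_count_consecutive_chars s → Spec_count_consecutive_chars s (count_consecutive_chars s)

-- ===== LEMMAS AND PROOFS =====

-- canonical generator: outputs for the remaining chars given previous char and current count
def pvGen : Char → Int → List Char → List Int
  | _, _, [] => []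
  | prev, t, d :: ds =>
      let t' := if d == prev then t + 1 else t
      t' :: pvGen d t' ds

-- A-side helpers (prefix-sum characterisation of A's fold)
def pvFlags (cs : List Char) : List Int :=
  (cs.zip cs.tail).map (fun p => if p.1 == p.2 then (1 : Int) else 0)

def pvAccum : Int → List Int → List Int
  | _, [] => []
  | t, f :: fs => (t + f) :: pvAccum (t + f) fs

def pvStep (cs : List Char) (st : List Int × Int) (i : Int) : List Int × Int :=
  let count := if PySem.List.pyGet? cs i == PySem.List.pyGet? cs (i - 1) then st.2 + 1 else st.2
  (PySem.List.pySetD st.1 i count, count)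

theorem pvFlags_length (cs : List Char) : (pvFlags cs).length = cs.length - 1 := by
  simp [pvFlags, List.length_zip]

theorem take_set_self (l : List Int) (k : Nat) (v : Int) :
    (l.set k v).take k = l.take k := by
  induction l generalizing k with
  | nil => simp
  | cons x xs ih =>
    cases k with
    | zero => simp
    | succ k => simp [List.set, ih]

theorem take_succ_set (l : List Int) (k : Nat) (v : Int) (hk : k < l.length) :
    (l.set k v).take (k + 1) = l.take k ++ [v] := by
  rw [List.take_add_one, take_set_self]
  simp [List.getElem?_set_self (by simpa using hk)]

theorem pvFlags_getElem (cs : List Char) (j : Nat) (h : j + 1 < cs.length) :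
    (pvFlags cs)[j]'(by simp [pvFlags, List.length_zip]; omega) =
      if cs[j]'(by omega) == cs[j + 1]'h then (1 : Int) else 0 := by
  have hz : j < (cs.zip cs.tail).length := by simp [List.length_zip]; omega
  simp only [pvFlags, List.getElem_map, List.getElem_zip, List.getElem_tail]

theorem pvMain (m : Nat) : ∀ (cs : List Char) (k : Nat) (l : List Int) (c : Int),
    1 ≤ k → k + m = cs.length → l.length = cs.length →
    ((PySem.List.pyRange (k : Int) (cs.length : Int) 1).foldl (pvStep cs) (l, c)).1 =
      l.take k ++ pvAccum c ((pvFlags cs).drop (k - 1)) := by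
  induction m with
  | zero =>
    intro cs k l c hk hkm hl
    have hkc : (k : Int) = (cs.length : Int) := by omega
    rw [hkc, PySem.List.pyRange_one_eq_nil (le_refl _)]
    have hdrop : (pvFlags cs).drop (k - 1) = [] := by
      apply List.drop_eq_nil_of_le
      rw [pvFlags_length]; omega
    rw [hdrop]
    simp only [List.foldl_nil, pvAccum, List.append_nil]
    have hle : l.length ≤ k := by omega
    exact (List.take_of_length_le hle).symm
  | succ m ih =>
    intro cs k l c hk hkm hl
    have hklt : (k : Int) < (cs.length : Int) := by omega
    rw [PySem.List.pyRange_one_cons hklt]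
    simp only [List.foldl_cons]
    have hk1 : ((k : Int)) - 1 = ((k - 1 : Nat) : Int) := by omega
    have hkl : k < cs.length := by omega
    have hk1l : k - 1 < cs.length := by omega
    have hget1 : PySem.List.pyGet? cs (k : Int) = some (cs[k]'hkl) :=
      PySem.List.pyGet?_ofNat cs k hkl
    have hget2 : PySem.List.pyGet? cs ((k : Int) - 1) = some (cs[k-1]'hk1l) := by
      rw [hk1]; exact PySem.List.pyGet?_ofNat cs (k-1) hk1l
    set c' : Int := if PySem.List.pyGet? cs (k : Int) == PySem.List.pyGet? cs ((k : Int) - 1) then c + 1 else c with hc'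
    have hstep : pvStep cs (l, c) (k : Int) = (l.set k c', c') := by
      simp only [pvStep, ← hc']
      rw [PySem.List.pySetD_natCast]
    rw [hstep]
    have hlen' : (l.set k c').length = cs.length := by simpa using hl
    have := ih cs (k + 1) (l.set k c') c' (by omega) (by omega) hlen'
    push_cast at this
    rw [this]
    have hjlt : (k - 1) + 1 < cs.length := by omega
    have hflagidx : (k - 1) < (pvFlags cs).length := by rw [pvFlags_length]; omega
    have hdropcons : (pvFlags cs).drop (k - 1) =
        ((pvFlags cs)[k-1]'hflagidx) :: (pvFlags cs).drop ((k - 1) + 1) :=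
      List.drop_eq_getElem_cons hflagidx
    have hk11 : (k - 1) + 1 = k := by omega
    have hflagval : (pvFlags cs)[k-1]'hflagidx =
        if cs[k-1]'hk1l == cs[k]'hkl then (1 : Int) else 0 := by
      have := pvFlags_getElem cs (k - 1) hjlt
      simpa [hk11] using this
    have hcc : c + ((pvFlags cs)[k-1]'hflagidx) = c' := by
      rw [hflagval, hc', hget1, hget2]
      by_cases h : cs[k-1]'hk1l = cs[k]'hkl
      · simp [h]
      · have h' : ¬ (cs[k]'hkl = cs[k-1]'hk1l) := fun e => h e.symm
        simp [h, h']
    rw [hdropcons]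
    simp only [pvAccum, hcc, hk11]
    rw [take_succ_set l k c' (by omega)]
    simp

-- pvAccum over pair flags is the canonical generator
theorem pvAccum_flags (cs : List Char) : ∀ (prev : Char) (t : Int),
    pvAccum t (pvFlags (prev :: cs)) = pvGen prev t cs := by
  induction cs with
  | nil => intro prev t; simp [pvFlags, pvAccum, pvGen]
  | cons d ds ih =>
    intro prev t
    have hfl : pvFlags (prev :: d :: ds) =
        (if prev == d then (1 : Int) else 0) :: pvFlags (d :: ds) := by
      simp [pvFlags]
    rw [hfl]
    simp only [pvAccum, pvGen, ih d]
    by_cases h : prev = d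
    · simp [h]
    · have h' : ¬ (d = prev) := fun e => h e.symm
      simp [h, h']

-- A's port equals the canonical generator
theorem pvA_eq (s : String) :
    count_consecutive_chars s =
      (match s.toList with
       | [] => []
       | c :: rest => 0 :: pvGen c 0 rest) := by
  unfold count_consecutive_chars
  cases hcs : s.toList with
  | nil => simp [PySem.List.pyRange_one_eq_nil]
  | cons x xs =>
    simp only []
    have hlen : 1 + xs.length = (x :: xs).length := by simp [Nat.add_comm]
    have hl : (List.replicate ((((x :: xs).length : Int)).toNat) (0 : Int)).length = (x :: xs).length := by simp
    have hfold := pvMain xs.length (x :: xs) 1 (List.replicate ((((x :: xs).length : Int)).toNat) 0) 0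
      (le_refl 1) hlen hl
    have h1 : ((1 : Nat) : Int) = (1 : Int) := by norm_num
    rw [h1] at hfold
    show ((PySem.List.pyRange 1 ((x :: xs).length : Int) 1).foldl (pvStep (x :: xs))
        (List.replicate (((x :: xs).length : Int)).toNat 0, 0)).1 = _
    rw [hfold]
    have htake : (List.replicate (((x :: xs).length : Int)).toNat (0 : Int)).take 1 = [0] := by
      simp [List.take_replicate]
    rw [htake, List.drop_zero, pvAccum_flags]
    simp

-- B's fold over the remaining runs, given k chars of the current run already seen
theorem pvB_main (cs : List Char) : ∀ (prev : Char) (k : Nat) (T : Int) (out : List Int),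
    1 ≤ k →
    ((pvRunsAux prev k cs).foldl
      (fun (st : List Int × Int) (L : Nat) =>
        (st.1 ++ PySem.List.pyRange st.2 (st.2 + (L : Int)) 1, st.2 + (L : Int) - 1))
      (out, T)).1
    = out ++ PySem.List.pyRange T (T + (k : Int)) 1 ++ pvGen prev (T + (k : Int) - 1) cs := by
  induction cs with
  | nil => intro prev k T out hk; simp [pvRunsAux, pvGen]
  | cons d ds ih =>
    intro prev k T out hk
    unfold pvRunsAux
    by_cases h : d = prev
    · have hb : (d == prev) = true := by simp [h]
      rw [hb]
      simp only [if_true]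
      rw [ih prev (k + 1) T out (by omega)]
      have hcast : ((k + 1 : Nat) : Int) = (k : Int) + 1 := by push_cast; ring
      rw [hcast]
      have e : T + ((k : Int) + 1) = (T + (k : Int)) + 1 := by ring
      rw [e, PySem.List.pyRange_one_succ_right (by omega)]
      have e2 : T + (k : Int) + 1 - 1 = T + (k : Int) := by ring
      rw [e2]
      simp [pvGen, h, List.append_assoc]
    · have hb : (d == prev) = false := by simp [h]
      rw [hb]
      simp only [Bool.false_eq_true, if_false, List.foldl_cons]
      rw [ih d 1 (T + (k : Int) - 1) (out ++ PySem.List.pyRange T (T + (k : Int)) 1) (le_refl 1)]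
      have e : T + (k : Int) - 1 + ((1 : Nat) : Int) = (T + (k : Int) - 1) + 1 := by push_cast; ring
      rw [e, PySem.List.pyRange_one_singleton]
      have e2 : T + (k : Int) - 1 + 1 - 1 = T + (k : Int) - 1 := by ring
      rw [e2]
      simp [pvGen, hb, List.append_assoc]

theorem pvPorts_eq (s : String) :
    count_consecutive_chars s = count_consecutive_chars_alt s := by
  rw [pvA_eq]
  unfold count_consecutive_chars_alt
  cases hcs : s.toList with
  | nil => simp [pvRuns]
  | cons c rest =>
    simp only [pvRuns]
    rw [pvB_main rest c 1 0 [] (le_refl 1)]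
    have h01 : PySem.List.pyRange 0 (0 + ((1 : Nat) : Int)) 1 = [0] := by decide
    rw [h01]
    norm_num

-- ===== VERDICT (by name: the statement is the Claim_ definition above) =====
theorem count_consecutive_chars_spec : Claim_equal_count_consecutive_chars := by
  intro s _
  unfold Spec_count_consecutive_chars
  exact pvPorts_eq s
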